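-- pv_equiv track=rewrite | github.com/ivangotovets/algorithms | Python Handbook/3.2 Множества,словари/список парам двоичных чисел.py | calc_stat
-- ===== SOURCE A (Python) =====
-- def calc_stat(num):
--     stat = {
--         'digits': 0,
--         'units': 0,
--         'zeros': 0,
--     }
--     while num > 0:
--         if num % 10 == 1:
--             stat['units'] += 1
--         if num % 10 == 0:
--             stat['zeros'] += 1
--         stat['digits'] += 1
--         num = num // 10
--     return stat
-- ===== SOURCE B (Python) =====
-- def calc_stat(num):
--     if num <= 0:
--         return {'digits': 0, 'units': 0, 'zeros': 0}
--     s = str(num)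
--     return {'digits': len(s), 'units': s.count('1'), 'zeros': s.count('0')}
-- ===== Notes on version B (the rewrite author's own statement) =====
-- stated objective: idiomatic
-- what changed: Replaces the manual modulus/integer-division digit loop and dict mutation with the standard-library idiom: convert to the decimal string once and read digits=len(s), units=s.count('1'), zeros=s.count('0'); non-positive input returns the all-zero dict as in A.
import Mathlib
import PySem

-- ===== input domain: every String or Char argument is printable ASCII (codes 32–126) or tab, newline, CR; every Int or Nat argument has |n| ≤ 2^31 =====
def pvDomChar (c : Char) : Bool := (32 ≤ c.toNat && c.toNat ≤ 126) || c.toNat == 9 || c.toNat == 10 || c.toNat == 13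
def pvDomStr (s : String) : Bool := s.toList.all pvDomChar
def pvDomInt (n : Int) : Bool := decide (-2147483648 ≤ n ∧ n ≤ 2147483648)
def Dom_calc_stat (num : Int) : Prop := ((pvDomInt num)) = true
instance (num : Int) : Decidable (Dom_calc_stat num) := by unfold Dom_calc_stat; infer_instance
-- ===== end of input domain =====

-- B converts the number to its decimal string and counts characters there, instead of A's
-- manual %10 // 10 loop with dict mutation (objective: idiomatic; same asymptotic cost).

-- ===== PORT A =====
-- the while-loop of A: state is the dict `stat`
def calcStatLoop (num : Int) (stat : PySem.Dict String Int) : PySem.Dict String Int :=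
  if h : num > 0 then
    let s1 := if PySem.Int.mod num 10 = 1 then stat.modify "units" 0 (· + 1) else stat
    let s2 := if PySem.Int.mod num 10 = 0 then s1.modify "zeros" 0 (· + 1) else s1
    calcStatLoop (PySem.Int.floordiv num 10) (s2.modify "digits" 0 (· + 1))
  else stat
termination_by num.toNat
decreasing_by
  simp only [PySem.Int.floordiv]
  rw [Int.fdiv_eq_ediv_of_nonneg num (by omega : (0:Int) ≤ 10)]
  omega

def calc_stat (num : Int) : List (String × Int) :=
  (calcStatLoop num (((PySem.Dict.empty.insert "digits" 0).insert "units" 0).insert "zeros" 0)).items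

-- ===== PORT B =====
def calc_stat_alt (num : Int) : List (String × Int) :=
  if num ≤ 0 then [("digits", 0), ("units", 0), ("zeros", 0)]
  else
    let s := PySem.Int.toStr num
    [("digits", PySem.Str.len s),
     ("units", (PySem.Str.count s "1" : Int)),
     ("zeros", (PySem.Str.count s "0" : Int))]

-- ===== PRECONDITION & SPEC =====
def Spec_calc_stat (num : Int) (out : List (String × Int)) : Prop := out = calc_stat_alt num
instance (num : Int) (out : List (String × Int)) : Decidable (Spec_calc_stat num out) := by unfold Spec_calc_stat; infer_instance

-- ===== CLAIM (what is proved, stated in full; the proofs are below) =====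
def Claim_equal_calc_stat : Prop := ∀ (num : Int), Dom_calc_stat num → Spec_calc_stat num (calc_stat num)

-- ===== LEMMAS AND PROOFS =====

-- the decimal digit characters of n, most significant first (what Nat.toDigits 10 computes)
def decChars (n : Nat) : List Char :=
  let d := (n % 10).digitChar
  if _h : n / 10 = 0 then [d] else decChars (n / 10) ++ [d]
termination_by n
decreasing_by exact Nat.div_lt_self (by omega) (by norm_num)

lemma toDigitsCore_eq (f : Nat) : ∀ (n : Nat) (ds : List Char), n < f →
    Nat.toDigitsCore 10 f n ds = decChars n ++ ds := by
  induction f with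
  | zero => intro n ds h; omega
  | succ f ih =>
    intro n ds h
    rw [Nat.toDigitsCore, decChars]
    by_cases h0 : n / 10 = 0
    · simp [h0]
    · simp only [h0, if_false]
      rw [ih (n / 10) _ (by omega)]
      simp

lemma toDigits_eq (n : Nat) : Nat.toDigits 10 n = decChars n := by
  simpa [Nat.toDigits] using toDigitsCore_eq (n + 1) n [] (Nat.lt_succ_self n)

lemma digitChar_eq_one (r : Nat) (h : r < 10) : ((r.digitChar = '1') ↔ r = 1) := by
  interval_cases r <;> simp <;> decide

lemma digitChar_eq_zero (r : Nat) (h : r < 10) : ((r.digitChar = '0') ↔ r = 0) := by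
  interval_cases r <;> simp <;> decide

def mkD (a b c : Int) : PySem.Dict String Int :=
  ((PySem.Dict.empty.insert "digits" a).insert "units" b).insert "zeros" c

lemma modify_units (a b c : Int) : (mkD a b c).modify "units" 0 (· + 1) = mkD a (b + 1) c := by
  simp [mkD, PySem.Dict.modify, PySem.Dict.insert, PySem.Dict.empty, PySem.Dict.contains,
    PySem.Dict.getD, PySem.Dict.get?]

lemma modify_zeros (a b c : Int) : (mkD a b c).modify "zeros" 0 (· + 1) = mkD a b (c + 1) := by
  simp [mkD, PySem.Dict.modify, PySem.Dict.insert, PySem.Dict.empty, PySem.Dict.contains,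
    PySem.Dict.getD, PySem.Dict.get?]

lemma modify_digits (a b c : Int) : (mkD a b c).modify "digits" 0 (· + 1) = mkD (a + 1) b c := by
  simp [mkD, PySem.Dict.modify, PySem.Dict.insert, PySem.Dict.empty, PySem.Dict.contains,
    PySem.Dict.getD, PySem.Dict.get?]

lemma items_mkD (a b c : Int) : (mkD a b c).items = [("digits", a), ("units", b), ("zeros", c)] := by
  simp [mkD, PySem.Dict.insert, PySem.Dict.empty, PySem.Dict.contains]

lemma loop_zero (d : PySem.Dict String Int) : calcStatLoop 0 d = d := by
  rw [calcStatLoop]; simp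

lemma loop_eq (n : Nat) (hn : 0 < n) (a b c : Int) :
    calcStatLoop (n : Int) (mkD a b c) =
      mkD (a + (decChars n).length) (b + (decChars n).count '1') (c + (decChars n).count '0') := by
  induction n using Nat.strong_induction_on generalizing a b c with
  | _ n ih =>
    have hpos : (n : Int) > 0 := by exact_mod_cast hn
    have hmod : PySem.Int.mod (n : Int) 10 = ((n % 10 : Nat) : Int) := by
      simp only [PySem.Int.mod, Int.fmod_eq_emod]
      simp
    have hdiv : PySem.Int.floordiv (n : Int) 10 = ((n / 10 : Nat) : Int) := by
      simp only [PySem.Int.floordiv]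
      rw [Int.fdiv_eq_ediv_of_nonneg (n:Int) (by omega : (0:Int) ≤ 10)]
      omega
    have hr : n % 10 < 10 := Nat.mod_lt _ (by norm_num)
    rw [calcStatLoop, dif_pos hpos, hmod, hdiv, decChars]
    have e1 : ((((n % 10 : Nat)) : Int) = 1) ↔ (n % 10 = 1) := by omega
    have e0 : ((((n % 10 : Nat)) : Int) = 0) ↔ (n % 10 = 0) := by omega
    by_cases h0 : n / 10 = 0
    · simp only [h0, dite_true, Int.natCast_zero, loop_zero]
      by_cases h1 : n % 10 = 1
      · rw [if_pos (e1.mpr h1), if_neg (by omega), modify_units, modify_digits, h1]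
        have d1 : Nat.digitChar 1 = '1' := by decide
        simp [d1]
      · by_cases hz : n % 10 = 0
        · rw [if_neg (fun hh => h1 (e1.mp hh)), if_pos (e0.mpr hz), modify_zeros, modify_digits, hz]
          have d0 : Nat.digitChar 0 = '0' := by decide
          simp [d0]
        · rw [if_neg (fun hh => h1 (e1.mp hh)), if_neg (fun hh => hz (e0.mp hh)), modify_digits]
          have c1 : List.count '1' [(n % 10).digitChar] = 0 := by
            simp [List.count_singleton, (digitChar_eq_one _ hr)]; omega
          have c0 : List.count '0' [(n % 10).digitChar] = 0 := by
            simp [List.count_singleton, (digitChar_eq_zero _ hr)]; omega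
          rw [c1, c0]
          norm_num
    · simp only [h0, dite_false]
      have hrec := ih (n / 10) (Nat.div_lt_self hn (by norm_num)) (by omega)
      have lenrw : ((decChars (n / 10) ++ [(n % 10).digitChar]).length : Int)
          = (decChars (n / 10)).length + 1 := by simp
      have cnt : ∀ ch : Char, ((decChars (n / 10) ++ [(n % 10).digitChar]).count ch : Int)
          = ((decChars (n / 10)).count ch : Int) + (List.count ch [(n % 10).digitChar] : Nat) := by
        intro ch; push_cast [List.count_append]; ring
      by_cases h1 : n % 10 = 1
      · rw [if_pos (e1.mpr h1), if_neg (by omega), modify_units, modify_digits, hrec,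
          lenrw, cnt '1', cnt '0', h1]
        have d1 : Nat.digitChar 1 = '1' := by decide
        rw [d1]
        have t1 : (List.count '1' ['1'] : Int) = 1 := by decide
        have t0 : (List.count '0' ['1'] : Int) = 0 := by decide
        rw [t1, t0]; ring_nf
      · by_cases hz : n % 10 = 0
        · rw [if_neg (fun hh => h1 (e1.mp hh)), if_pos (e0.mpr hz), modify_zeros, modify_digits,
            hrec, lenrw, cnt '1', cnt '0', hz]
          have d0 : Nat.digitChar 0 = '0' := by decide
          rw [d0]
          have t1 : (List.count '1' ['0'] : Int) = 0 := by decide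
          have t0 : (List.count '0' ['0'] : Int) = 1 := by decide
          rw [t1, t0]; ring_nf
        · rw [if_neg (fun hh => h1 (e1.mp hh)), if_neg (fun hh => hz (e0.mp hh)), modify_digits,
            hrec, lenrw, cnt '1', cnt '0']
          have c1 : (List.count '1' [(n % 10).digitChar] : Int) = 0 := by
            norm_cast
            simp [List.count_singleton, (digitChar_eq_one _ hr)]; omega
          have c0 : (List.count '0' [(n % 10).digitChar] : Int) = 0 := by
            norm_cast
            simp [List.count_singleton, (digitChar_eq_zero _ hr)]; omega
          rw [c1, c0]; ring_nf

lemma count_go_single (c : Char) (f : Nat) : ∀ (l : List Char) (acc : Nat), l.length ≤ f →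
    PySem.Chars.count.go [c] f l acc = acc + l.count c := by
  induction f with
  | zero => intro l acc h; rw [PySem.Chars.count.go]; cases l <;> simp_all
  | succ f ih =>
    intro l acc h
    cases l with
    | nil =>
      rw [PySem.Chars.count.go]
      simp
      omega
    | cons x t =>
      rw [PySem.Chars.count.go]
      have hlen : t.length ≤ f := by simpa using h
      by_cases hx : c = x
      · subst hx
        simp [List.isPrefixOf, ih t (acc + 1) hlen]
        omega
      · simp [List.isPrefixOf, hx, ih t acc hlen, Ne.symm hx]

lemma count_single (l : List Char) (c : Char) : PySem.Chars.count l [c] = l.count c := by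
  rw [PySem.Chars.count]
  simp [count_go_single c l.length l 0 le_rfl]

-- ===== VERDICT (by name: the statement is the Claim_ definition above) =====
theorem calc_stat_spec : Claim_equal_calc_stat := by
  intro num _
  unfold Spec_calc_stat calc_stat calc_stat_alt
  by_cases h : num ≤ 0
  · rw [if_pos h]
    have hl : calcStatLoop num (mkD 0 0 0) = mkD 0 0 0 := by
      rw [calcStatLoop]; simp [not_lt.mpr h]
    show (calcStatLoop num (mkD 0 0 0)).items = _
    rw [hl, items_mkD]
  · rw [if_neg h]
    have hn : 0 < num.toNat := by omega
    have hrw : (num.toNat : Int) = num := by omega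
    have := loop_eq num.toNat hn 0 0 0
    rw [hrw] at this
    show (calcStatLoop num (mkD 0 0 0)).items = _
    rw [this, items_mkD]
    have hs : (PySem.Int.toStr num).toList = decChars num.toNat := by
      rw [PySem.Int.toList_toStr, PySem.Int.toChars, if_neg (by omega), toDigits_eq]
    simp only [PySem.Str.len_eq, PySem.Str.count_eq, hs]
    have t1 : ("1" : String).toList = ['1'] := by decide
    have t0 : ("0" : String).toList = ['0'] := by decide
    rw [t1, t0, count_single, count_single]
    norm_num
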